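-- pv_equiv track=rewrite | github.com/yariks5s/lab_theor_prog | main.py | parse_WH
-- ===== SOURCE A (Python) =====
-- def parse_WH(words: list) -> list:
--     for i in range(0, len(words) - 3):
--         if words[i] == "while":
--             words[i] = "WH("
--             words.pop(i+2)
--             words.insert(i+2, ", ")
--             return parse_WH(words)
--     return words
-- ===== SOURCE B (Python) =====
-- def parse_WH(words: list) -> list:
--     for i in range(len(words) - 3):
--         if words[i] == "while":
--             words[i] = "WH("
--             words[i + 2] = ", "
--     return words
-- ===== Notes on version B (the rewrite author's own statement) =====
-- stated objective: simpler
-- what changed: A rescans from the start (via tail recursion) after every replaced 'while'; B is a plain single left-to-right for loop editing words[i] and words[i+2] in place, which is safe because the replacement tokens can never match 'while'.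
import Mathlib
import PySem

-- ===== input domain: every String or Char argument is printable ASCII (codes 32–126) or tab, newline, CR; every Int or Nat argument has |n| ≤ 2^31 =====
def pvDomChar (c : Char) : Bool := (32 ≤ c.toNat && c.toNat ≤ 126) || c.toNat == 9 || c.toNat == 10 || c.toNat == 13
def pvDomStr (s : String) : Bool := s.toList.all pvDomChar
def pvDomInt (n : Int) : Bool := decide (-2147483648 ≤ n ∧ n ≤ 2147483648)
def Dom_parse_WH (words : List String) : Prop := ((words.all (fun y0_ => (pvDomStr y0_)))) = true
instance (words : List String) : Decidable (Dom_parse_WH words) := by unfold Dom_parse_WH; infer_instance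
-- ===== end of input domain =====

-- B replaces A's recursion-restarting-from-index-0 after each edit by a single plain
-- left-to-right in-place pass (objective: simpler). Both Pythons mutate `words` in place and
-- produce the same final list state; the equivalence proved here is about the return value.


-- ===== PORT A =====
-- termination facts cited by parse_WH_loop's decreasing_by
theorem pv_erase_insert_set (l : List String) (k : Nat) (x : String) (h : k < l.length) :
    (l.eraseIdx k).insertIdx k x = l.set k x := by
  induction l generalizing k with
  | nil => simp at h
  | cons y ys ih =>
    cases k with
    | zero => simp [List.eraseIdx, List.insertIdx]
    | succ n => simp_all [List.eraseIdx, List.insertIdx]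

theorem pv_count_edit_lt (ws : List String) (i : Nat) (h : i + 3 < ws.length)
    (hw : ws.getD i "" = "while") :
    (((ws.set i "WH(").eraseIdx (i+2)).insertIdx (i+2) ", ").count "while" < ws.count "while" := by
  rw [pv_erase_insert_set _ _ _ (by simp; omega)]
  have h1 : i < ws.length := by omega
  have h2 : i + 2 < (ws.set i "WH(").length := by simp; omega
  rw [List.count_set h2, List.count_set h1]
  have : ws[i] = "while" := by rw [← List.getD_eq_getElem ws "" h1]; exact hw
  have hpos : 0 < ws.count "while" := List.count_pos_iff.mpr (this ▸ ws.getElem_mem h1)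
  simp [this]
  omega

-- the recursive body of A: a for-loop over range(0, len-3) with early return + self-call
def parse_WH_loop (ws : List String) (i : Nat) : List String :=
  if h : i + 3 < ws.length then
    if hw : ws.getD i "" = "while" then
      -- words[i] = "WH("; words.pop(i+2); words.insert(i+2, ", "); return parse_WH(words)
      parse_WH_loop (((ws.set i "WH(").eraseIdx (i+2)).insertIdx (i+2) ", ") 0
    else
      parse_WH_loop ws (i + 1)
  else ws
termination_by (ws.count "while", ws.length - i)
decreasing_by
  · exact Prod.Lex.left _ _ (pv_count_edit_lt ws i h hw)
  · exact Prod.Lex.right _ (by omega)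

def parse_WH (words : List String) : List String := parse_WH_loop words 0

-- ===== PORT B =====
-- single forward pass, editing in place (both assignments are List.set)
def parse_WH_alt_go (ws : List String) (i : Nat) : List String :=
  if h : i + 3 < ws.length then
    if ws.getD i "" = "while" then
      parse_WH_alt_go ((ws.set i "WH(").set (i + 2) ", ") (i + 1)
    else
      parse_WH_alt_go ws (i + 1)
  else ws
termination_by ws.length - i
decreasing_by
  · simp; omega
  · omega

def parse_WH_alt (words : List String) : List String := parse_WH_alt_go words 0

-- ===== PRECONDITION & SPEC =====
def Spec_parse_WH (words : List String) (out : List String) : Prop := out = parse_WH_alt words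
instance (words : List String) (out : List String) : Decidable (Spec_parse_WH words out) := by unfold Spec_parse_WH; infer_instance

-- ===== CLAIM (what is proved, stated in full; the proofs are below) =====
def Claim_equal_parse_WH : Prop := ∀ (words : List String), Dom_parse_WH words → Spec_parse_WH words (parse_WH words)

-- ===== LEMMAS AND PROOFS =====

-- B's pass skips a "while"-free prefix: starting at 0 equals starting at m
theorem pv_alt_skip (ws : List String) (m : Nat)
    (hclean : ∀ j, j < m → ws.getD j "" ≠ "while") :
    parse_WH_alt_go ws 0 = parse_WH_alt_go ws m := by
  induction m with
  | zero => rfl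
  | succ n ih =>
    rw [ih (fun j hj => hclean j (by omega))]
    rw [parse_WH_alt_go]
    split
    · rw [if_neg (hclean n (by omega))]
    · rw [parse_WH_alt_go]
      rw [dif_neg (by omega)]

-- main: with a "while"-free prefix below m, A's restart-scan from m equals B's pass from m
theorem pv_loop_eq_alt (ws : List String) (m : Nat)
    (hclean : ∀ j, j < m → ws.getD j "" ≠ "while") :
    parse_WH_loop ws m = parse_WH_alt_go ws m := by
  induction ws, m using parse_WH_loop.induct with
  | case1 ws i h hw ih =>
    rw [parse_WH_loop, dif_pos h, dif_pos hw]
    rw [ih (fun j hj => by omega)]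
    have hi : i < ws.length := by omega
    have hset : (((ws.set i "WH(").eraseIdx (i+2)).insertIdx (i+2) ", ")
        = (ws.set i "WH(").set (i+2) ", " := pv_erase_insert_set _ _ _ (by simp; omega)
    rw [hset]
    have hclean' : ∀ j, j < i + 1 →
        ((ws.set i "WH(").set (i+2) ", ").getD j "" ≠ "while" := by
      intro j hj
      rcases Nat.lt_or_ge j i with hji | hji
      · have : ((ws.set i "WH(").set (i+2) ", ")[j]? = ws[j]? := by
          rw [List.getElem?_set_ne (by omega), List.getElem?_set_ne (by omega)]
        simpa [List.getD, this] using hclean j hji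
      · have hj_eq : j = i := by omega
        rw [hj_eq]
        have hx : ((ws.set i "WH(").set (i+2) ", ")[i]? = some "WH(" := by
          rw [List.getElem?_set_ne (by omega)]
          exact List.getElem?_set_self (by omega)
        simp [List.getD, hx]
    rw [pv_alt_skip _ _ hclean']
    conv_rhs => rw [parse_WH_alt_go]
    rw [dif_pos h, if_pos hw]
  | case2 ws i h hw ih =>
    rw [parse_WH_loop, dif_pos h, dif_neg hw]
    rw [ih (fun j hj => by rcases Nat.lt_or_ge j i with hji | hji
                           · exact hclean j hji
                           · have : j = i := by omega
                             exact this ▸ hw)]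
    conv_rhs => rw [parse_WH_alt_go]
    rw [dif_pos h, if_neg hw]
  | case3 ws i h =>
    rw [parse_WH_loop, dif_neg h, parse_WH_alt_go, dif_neg h]

-- ===== VERDICT (by name: the statement is the Claim_ definition above) =====
theorem parse_WH_spec : Claim_equal_parse_WH := by
  intro words _
  unfold Spec_parse_WH parse_WH parse_WH_alt
  exact pv_loop_eq_alt words 0 (fun j hj => by omega)
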